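-- pv_equiv track=rewrite | github.com/ImperialKoi/Camera | image.py | combine_bounding_boxes
-- ===== SOURCE A (Python) =====
-- def combine_bounding_boxes(box1, box2):
--     x_coords = [point[0] for point in box1] + [point[0] for point in box2]
--     y_coords = [point[1] for point in box1] + [point[1] for point in box2]
--     return [
--         [min(x_coords), min(y_coords)],
--         [max(x_coords), min(y_coords)],
--         [max(x_coords), max(y_coords)],
--         [min(x_coords), max(y_coords)]
--     ]
-- ===== SOURCE B (Python) =====
-- def combine_bounding_boxes(box1, box2):
--     have = False
--     min_x = max_x = min_y = max_y = 0
--     for point in box1: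
--         x, y = point[0], point[1]
--         if not have:
--             min_x = max_x = x
--             min_y = max_y = y
--             have = True
--         else:
--             if x < min_x: min_x = x
--             if x > max_x: max_x = x
--             if y < min_y: min_y = y
--             if y > max_y: max_y = y
--     for point in box2:
--         x, y = point[0], point[1]
--         if not have:
--             min_x = max_x = x
--             min_y = max_y = y
--             have = True
--         else:
--             if x < min_x: min_x = x
--             if x > max_x: max_x = x
--             if y < min_y: min_y = y
--             if y > max_y: max_y = y
--     if not have:
--         raise ValueError("empty boxes")
--     return [
--         [min_x, min_y],
--         [max_x, min_y],
--         [max_x, max_y],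
--         [min_x, max_y],
--     ]
-- ===== Notes on version B (the rewrite author's own statement) =====
-- stated objective: alternative
-- what changed: Replaces the four list-comprehension passes plus four min/max library calls with one running-extrema loop over the points of box1 then box2, maintaining min_x/max_x/min_y/max_y directly.
import Mathlib
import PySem

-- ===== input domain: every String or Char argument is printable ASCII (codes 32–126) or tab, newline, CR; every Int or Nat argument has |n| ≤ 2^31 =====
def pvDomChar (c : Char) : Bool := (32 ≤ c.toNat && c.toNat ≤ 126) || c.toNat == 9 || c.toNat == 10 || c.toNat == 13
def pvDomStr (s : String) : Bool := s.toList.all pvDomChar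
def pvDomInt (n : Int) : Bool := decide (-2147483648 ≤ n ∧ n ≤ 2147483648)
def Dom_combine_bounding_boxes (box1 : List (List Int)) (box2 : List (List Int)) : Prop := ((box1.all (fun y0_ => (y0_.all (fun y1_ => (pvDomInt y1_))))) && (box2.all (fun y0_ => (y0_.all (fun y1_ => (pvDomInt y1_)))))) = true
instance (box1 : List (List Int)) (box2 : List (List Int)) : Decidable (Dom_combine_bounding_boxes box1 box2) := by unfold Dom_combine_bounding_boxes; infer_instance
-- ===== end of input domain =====

-- B replaces A's four comprehension/min/max passes by one running-extrema loop over box1 then box2 (objective: alternative).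

-- ===== PORT A =====
-- point[0] / point[1]; in range under Pre_, where pyGet? is some
def cbX (p : List Int) : Int := (PySem.List.pyGet? p 0).getD 0
def cbY (p : List Int) : Int := (PySem.List.pyGet? p 1).getD 0

def combine_bounding_boxes (box1 : List (List Int)) (box2 : List (List Int)) : List (List Int) :=
  let x_coords := box1.map cbX ++ box2.map cbX
  let y_coords := box1.map cbY ++ box2.map cbY
  [ [(PySem.List.min? x_coords (fun v => v)).getD 0, (PySem.List.min? y_coords (fun v => v)).getD 0],
    [(PySem.List.max? x_coords (fun v => v)).getD 0, (PySem.List.min? y_coords (fun v => v)).getD 0],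
    [(PySem.List.max? x_coords (fun v => v)).getD 0, (PySem.List.max? y_coords (fun v => v)).getD 0],
    [(PySem.List.min? x_coords (fun v => v)).getD 0, (PySem.List.max? y_coords (fun v => v)).getD 0] ]

-- ===== PORT B =====
-- one loop-body step: update (have, min_x, max_x, min_y, max_y)
def cbStep (st : Bool × Int × Int × Int × Int) (p : List Int) : Bool × Int × Int × Int × Int :=
  let x := cbX p
  let y := cbY p
  match st with
  | (false, _, _, _, _) => (true, x, x, y, y)
  | (true, mnx, mxx, mny, mxy) =>
      (true, if x < mnx then x else mnx, if x > mxx then x else mxx,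
             if y < mny then y else mny, if y > mxy then y else mxy)

def combine_bounding_boxes_alt (box1 : List (List Int)) (box2 : List (List Int)) : List (List Int) :=
  let st1 := box1.foldl cbStep (false, 0, 0, 0, 0)
  let st2 := box2.foldl cbStep st1
  match st2 with
  | (false, _, _, _, _) => []   -- Python B raises ValueError here (outside Pre_)
  | (true, mnx, mxx, mny, mxy) =>
      [[mnx, mny], [mxx, mny], [mxx, mxy], [mnx, mxy]]

-- ===== PRECONDITION & SPEC =====
-- A raises ValueError when both boxes are empty (min([])) and IndexError when some point has fewer
-- than 2 coordinates; exactly those inputs are excluded (B raises there too).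
def Pre_combine_bounding_boxes (box1 : List (List Int)) (box2 : List (List Int)) : Prop :=
  box1 ++ box2 ≠ [] ∧ ∀ p ∈ box1 ++ box2, 2 ≤ p.length
instance (box1 : List (List Int)) (box2 : List (List Int)) : Decidable (Pre_combine_bounding_boxes box1 box2) := by unfold Pre_combine_bounding_boxes; infer_instance

def pvWitness_combine_bounding_boxes : List (List Int) × List (List Int) :=
  ([[0, 1], [4, 3]], [[2, -1]])

def Spec_combine_bounding_boxes (box1 : List (List Int)) (box2 : List (List Int)) (out : List (List Int)) : Prop := out = combine_bounding_boxes_alt box1 box2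
instance (box1 : List (List Int)) (box2 : List (List Int)) (out : List (List Int)) : Decidable (Spec_combine_bounding_boxes box1 box2 out) := by unfold Spec_combine_bounding_boxes; infer_instance

-- ===== CLAIM (what is proved, stated in full; the proofs are below) =====
def Claim_equal_combine_bounding_boxes : Prop := ∀ (box1 : List (List Int)) (box2 : List (List Int)), Dom_combine_bounding_boxes box1 box2 → Pre_combine_bounding_boxes box1 box2 → Spec_combine_bounding_boxes box1 box2 (combine_bounding_boxes box1 box2)

-- ===== LEMMAS AND PROOFS =====

theorem cbStep_true (a b c d : Int) (p : List Int) :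
    cbStep (true, a, b, c, d) p = (true, min a (cbX p), max b (cbX p), min c (cbY p), max d (cbY p)) := by
  simp only [cbStep, min_def, max_def]
  refine congrArg _ ?_
  split_ifs <;> simp_all <;> omega

theorem cbFold_true (pts : List (List Int)) (a b c d : Int) :
    pts.foldl cbStep (true, a, b, c, d) =
      (true, (pts.map cbX).foldl min a, (pts.map cbX).foldl max b,
             (pts.map cbY).foldl min c, (pts.map cbY).foldl max d) := by
  induction pts generalizing a b c d with
  | nil => rfl
  | cons p rest ih => simp [List.foldl_cons, cbStep_true, ih]

theorem combine_bounding_boxes_spec_aux (box1 box2 : List (List Int))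
    (h : box1 ++ box2 ≠ []) :
    combine_bounding_boxes box1 box2 = combine_bounding_boxes_alt box1 box2 := by
  unfold combine_bounding_boxes combine_bounding_boxes_alt
  simp only [← List.foldl_append, ← List.map_append]
  cases hpts : box1 ++ box2 with
  | nil => exact absurd hpts h
  | cons p rest =>
    simp only [List.map_cons, PySem.List.min?_id_cons, PySem.List.max?_id_cons,
      List.foldl_cons, Option.getD_some]
    rw [show cbStep (false, 0, 0, 0, 0) p = (true, cbX p, cbX p, cbY p, cbY p) from rfl,
      cbFold_true]

-- ===== VERDICT (by name: the statement is the Claim_ definition above) =====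
theorem combine_bounding_boxes_spec : Claim_equal_combine_bounding_boxes := by
  intro box1 box2 _ hpre
  exact combine_bounding_boxes_spec_aux box1 box2 hpre.1
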